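-- pv_equiv track=rewrite | github.com/Andrew82106/ModelCrowdsourcingPoison | main.py | trajectory_to_budget_results
-- ===== SOURCE A (Python) =====
-- def trajectory_to_budget_results(trajectory, budgets):
--     """
--     根据轨迹计算不同预算下能解决的问题数
--     trajectory: [(solved_questions, accounts_used), ...]
--     budgets: [预算1, 预算2, ...]
--     返回: [对应预算下的解决问题数, ...]
--     """
--     results = []
--     for budget in budgets:
--         max_solved = 0
--         for solved_questions, accounts_used in trajectory:
--             if accounts_used <= budget:
--                 max_solved = solved_questions
--             else:
--                 break  # 轨迹是按账号使用递增的，可以提前结束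
--         results.append(max_solved)
--     return results
-- ===== SOURCE B (Python) =====
-- def trajectory_to_budget_results(trajectory, budgets):
--     # Process budgets in ascending order with one pointer sweeping the
--     # trajectory; place each answer back at its original index.
--     order = sorted(range(len(budgets)), key=lambda i: budgets[i])
--     results = [0] * len(budgets)
--     j = 0
--     cur = 0
--     for i in order:
--         b = budgets[i]
--         while j < len(trajectory) and trajectory[j][1] <= b:
--             cur = trajectory[j][0]
--             j += 1
--         results[i] = cur
--     return results
-- ===== Notes on version B (the rewrite author's own statement) =====
-- stated objective: faster
-- what changed: Instead of rescanning the trajectory prefix for every budget, B sorts the budget indices once and sweeps the trajectory with a single advancing pointer (the inner-loop stopping point is monotone in the budget), writing each answer back at its original index.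
import Mathlib
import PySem

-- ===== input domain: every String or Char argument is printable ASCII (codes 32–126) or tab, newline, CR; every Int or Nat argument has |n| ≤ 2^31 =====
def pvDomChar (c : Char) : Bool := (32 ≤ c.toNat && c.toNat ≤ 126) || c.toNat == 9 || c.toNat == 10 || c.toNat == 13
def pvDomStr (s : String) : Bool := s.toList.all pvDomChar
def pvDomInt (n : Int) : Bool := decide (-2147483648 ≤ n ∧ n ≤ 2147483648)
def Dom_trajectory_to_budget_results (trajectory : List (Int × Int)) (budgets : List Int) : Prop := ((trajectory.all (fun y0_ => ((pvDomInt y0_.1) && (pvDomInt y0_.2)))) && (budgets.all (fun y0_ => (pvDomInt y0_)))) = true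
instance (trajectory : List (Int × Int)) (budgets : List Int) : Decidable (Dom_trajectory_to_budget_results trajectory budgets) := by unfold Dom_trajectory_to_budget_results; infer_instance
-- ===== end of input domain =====

-- B replaces A's per-budget rescans of the trajectory by one sorted sweep with an
-- advancing pointer (objective: faster, O(B*T) → O(B log B + T)).

-- ===== PORT A =====
-- inner 'for … break' loop of A: walk the trajectory, keep the last solved count
-- whose accounts_used fits the budget, stop at the first that does not
def aScan : List (Int × Int) → Int → Int → Int
  | [], _, m => m
  | (s, a) :: t, b, m => if a ≤ b then aScan t b s else m

def trajectory_to_budget_results (trajectory : List (Int × Int)) (budgets : List Int) : List Int :=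
  budgets.foldl (fun results b => results ++ [aScan trajectory b 0]) []

-- ===== PORT B =====
-- B's inner 'while' loop: advance the pointer (drop from rest) while accounts_used ≤ b,
-- tracking the last solved count seen; returns (remaining trajectory, cur)
def bWhile : List (Int × Int) → Int → Int → List (Int × Int) × Int
  | [], _, cur => ([], cur)
  | (s, a) :: t, b, cur => if a ≤ b then bWhile t b s else ((s, a) :: t, cur)

-- B's 'for i in order' loop over sorted budget indices; i is always a valid index
def bLoop (bs : List Int) : List Int → List (Int × Int) → Int → List Int → List Int
  | [], _, _, res => res
  | i :: is, rest, cur, res =>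
      let b := (PySem.List.pyGet? bs i).getD 0   -- budgets[i]; i is always in range
      let p := bWhile rest b cur
      bLoop bs is p.1 p.2 (PySem.List.pySetD res i p.2)

def trajectory_to_budget_results_alt (trajectory : List (Int × Int)) (budgets : List Int) : List Int :=
  let order := PySem.List.sorted (PySem.List.pyRange 0 budgets.length 1)
      (fun i => (PySem.List.pyGet? budgets i).getD 0) false
  bLoop budgets order trajectory 0 (List.replicate budgets.length 0)

-- ===== PRECONDITION & SPEC =====
def Spec_trajectory_to_budget_results (trajectory : List (Int × Int)) (budgets : List Int) (out : List Int) : Prop := out = trajectory_to_budget_results_alt trajectory budgets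
instance (trajectory : List (Int × Int)) (budgets : List Int) (out : List Int) : Decidable (Spec_trajectory_to_budget_results trajectory budgets out) := by unfold Spec_trajectory_to_budget_results; infer_instance

-- ===== CLAIM (what is proved, stated in full; the proofs are below) =====
def Claim_equal_trajectory_to_budget_results : Prop := ∀ (trajectory : List (Int × Int)) (budgets : List Int), Dom_trajectory_to_budget_results trajectory budgets → Spec_trajectory_to_budget_results trajectory budgets (trajectory_to_budget_results trajectory budgets)

-- ===== LEMMAS AND PROOFS =====

-- A's foldl-with-append is a map
lemma aFold_eq_map (tr : List (Int × Int)) :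
    ∀ (bs : List Int) (acc : List Int),
      bs.foldl (fun results b => results ++ [aScan tr b 0]) acc = acc ++ bs.map (fun b => aScan tr b 0) := by
  intro bs
  induction bs with
  | nil => simp
  | cons b t ih => intro acc; simp [List.foldl, ih]

-- B's while loop computes A's inner scan on the remaining trajectory
lemma bWhile_snd : ∀ (rest : List (Int × Int)) (b cur : Int),
    (bWhile rest b cur).2 = aScan rest b cur := by
  intro rest
  induction rest with
  | nil => intro b cur; rfl
  | cons p t ih =>
      intro b cur
      obtain ⟨s, a⟩ := p
      by_cases h : a ≤ b <;> simp [bWhile, aScan, h, ih]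

-- advancing the pointer at a smaller budget does not change the scan at a larger one
lemma bWhile_mono : ∀ (rest : List (Int × Int)) (b0 b cur : Int), b0 ≤ b →
    aScan (bWhile rest b0 cur).1 b (bWhile rest b0 cur).2 = aScan rest b cur := by
  intro rest
  induction rest with
  | nil => intro b0 b cur _; rfl
  | cons p t ih =>
      intro b0 b cur hb
      obtain ⟨s, a⟩ := p
      by_cases h : a ≤ b0
      · have h' : a ≤ b := le_trans h hb
        simp [bWhile, aScan, h, h', ih b0 b s hb]
      · simp [bWhile, h]

-- main invariant for B's outer loop
lemma bLoop_spec (bs : List Int) (tr : List (Int × Int)) :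
    ∀ (is : List Int) (rest : List (Int × Int)) (cur : Int) (res : List Int),
      res.length = bs.length →
      (∀ i ∈ is, 0 ≤ i ∧ i < (bs.length : Int)) →
      is.Pairwise (fun i j => (PySem.List.pyGet? bs i).getD 0 ≤ (PySem.List.pyGet? bs j).getD 0) →
      (∀ i ∈ is, aScan rest ((PySem.List.pyGet? bs i).getD 0) cur
                 = aScan tr ((PySem.List.pyGet? bs i).getD 0) 0) →
      (bLoop bs is rest cur res).length = res.length ∧
      (∀ k : Nat, k < res.length →
        (bLoop bs is rest cur res)[k]? =
          if (k : Int) ∈ is then some (aScan tr ((PySem.List.pyGet? bs (k : Int)).getD 0) 0)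
          else res[k]?) := by
  intro is
  induction is with
  | nil =>
      intro rest cur res _ _ _ _
      exact ⟨rfl, fun k _ => by simp [bLoop]⟩
  | cons i is ih =>
      intro rest cur res hlen hvalid hpw hinv
      have hiv := hvalid i (List.mem_cons_self ..)
      have hiNat : i.toNat < res.length := by omega
      have hset : PySem.List.pySetD res i (bWhile rest ((PySem.List.pyGet? bs i).getD 0) cur).2
          = res.set i.toNat (bWhile rest ((PySem.List.pyGet? bs i).getD 0) cur).2 :=
        PySem.List.pySetD_of_nonneg _ _ hiv.1
      set b := (PySem.List.pyGet? bs i).getD 0 with hb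
      set p := bWhile rest b cur with hp
      have hpw' := (List.pairwise_cons.mp hpw)
      have hinv' : ∀ j ∈ is, aScan p.1 ((PySem.List.pyGet? bs j).getD 0) p.2
          = aScan tr ((PySem.List.pyGet? bs j).getD 0) 0 := by
        intro j hj
        rw [hp, bWhile_mono rest b _ cur (hpw'.1 j hj)]
        exact hinv j (List.mem_cons_of_mem _ hj)
      have hlen' : (res.set i.toNat p.2).length = bs.length := by simpa using hlen
      have IH := ih p.1 p.2 (res.set i.toNat p.2) hlen'
        (fun j hj => hvalid j (List.mem_cons_of_mem _ hj)) hpw'.2 hinv'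
      constructor
      · show (bLoop bs is p.1 p.2 (PySem.List.pySetD res i p.2)).length = res.length
        rw [hset]
        simpa using IH.1
      · intro k hk
        show (bLoop bs is p.1 p.2 (PySem.List.pySetD res i p.2))[k]? = _
        rw [hset]
        have hk' : k < (res.set i.toNat p.2).length := by simpa using hk
        have := IH.2 k hk'
        rw [this]
        by_cases hmem : (k : Int) ∈ is
        · simp [hmem]
        · by_cases hki : (k : Int) = i
          · have hcur : p.2 = aScan tr b 0 := by
              rw [hp, bWhile_snd]
              exact hinv i (List.mem_cons_self ..)
            have hkiNat : k = i.toNat := by omega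
            have hL : (res.set i.toNat p.2)[k]? = some p.2 := by
              subst hkiNat; exact List.getElem?_set_self (by omega)
            rw [if_neg hmem, hL, if_pos (List.mem_cons.mpr (Or.inl hki)), hcur, hki, ← hb]
          · rw [if_neg hmem, if_neg (by simp [hki, hmem])]
            have hne : i.toNat ≠ k := by omega
            simp [hne]

-- ===== VERDICT (by name: the statement is the Claim_ definition above) =====
theorem trajectory_to_budget_results_spec : Claim_equal_trajectory_to_budget_results := by
  intro tr bs _
  unfold Spec_trajectory_to_budget_results trajectory_to_budget_results trajectory_to_budget_results_alt
  rw [aFold_eq_map tr bs [], List.nil_append]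
  show List.map (fun b => aScan tr b 0) bs
      = bLoop bs (PySem.List.sorted (PySem.List.pyRange 0 (bs.length : Int) 1)
          (fun i => (PySem.List.pyGet? bs i).getD 0) false) tr 0 (List.replicate bs.length 0)
  set key : Int → Int := fun i => (PySem.List.pyGet? bs i).getD 0 with hkey
  set order := PySem.List.sorted (PySem.List.pyRange 0 (bs.length : Int) 1) key false with horder
  have hmem : ∀ i : Int, i ∈ order ↔ (0 ≤ i ∧ i < (bs.length : Int)) := by
    intro i
    rw [horder, PySem.List.mem_sorted, PySem.List.mem_pyRange_one]
  have hspec := bLoop_spec bs tr order tr 0 (List.replicate bs.length 0)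
    (by simp)
    (fun i hi => (hmem i).mp hi)
    (PySem.List.sorted_pairwise _ _)
    (fun _ _ => rfl)
  apply List.ext_getElem?
  intro k
  by_cases hk : k < bs.length
  · have h2 := hspec.2 k (by simpa using hk)
    have hkm : (k : Int) ∈ order := (hmem _).mpr ⟨by positivity, by exact_mod_cast hk⟩
    rw [h2, if_pos hkm]
    simp [PySem.List.pyGet?_natCast, List.getElem?_eq_getElem hk]
  · have h1 : (bs.map (fun b => aScan tr b 0)).length ≤ k := by simpa using Nat.le_of_not_lt hk
    have h2 : (bLoop bs order tr 0 (List.replicate bs.length 0)).length ≤ k := by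
      rw [hspec.1]; simpa using Nat.le_of_not_lt hk
    rw [List.getElem?_eq_none h1, List.getElem?_eq_none h2]
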